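-- pv_equiv track=rewrite | github.com/NLear/Flow-MAE | dataset/dataset_dicts.py | _dict_batch_loader
-- ===== SOURCE A (Python) =====
-- from typing import Dict, Callable, Union, Optional, List, Tuple, Any
--
-- def _dict_batch_loader(input_dict: Dict[str, Any], batch_size: int) -> List[Tuple[str, Any]]:
--     assert batch_size > 0
--     cnt = 0
--     batch = []
--     for k, v in input_dict.items():
--         batch.append((k, v))
--         cnt += 1
--         if cnt % batch_size == 0:
--             yield batch
--             batch = []
--     if batch:
--         yield batch
-- ===== SOURCE B (Python) =====
-- def _dict_batch_loader(input_dict, batch_size):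
--     assert batch_size > 0
--     rest = list(input_dict.items())
--     while rest:
--         yield rest[:batch_size]
--         rest = rest[batch_size:]
-- ===== Notes on version B (the rewrite author's own statement) =====
-- stated objective: simpler
-- what changed: B materializes the items once and yields successive slices of size batch_size, maintaining only the remaining suffix instead of A's per-item accumulator list, running counter and modulo test with a trailing flush.
import Mathlib
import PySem

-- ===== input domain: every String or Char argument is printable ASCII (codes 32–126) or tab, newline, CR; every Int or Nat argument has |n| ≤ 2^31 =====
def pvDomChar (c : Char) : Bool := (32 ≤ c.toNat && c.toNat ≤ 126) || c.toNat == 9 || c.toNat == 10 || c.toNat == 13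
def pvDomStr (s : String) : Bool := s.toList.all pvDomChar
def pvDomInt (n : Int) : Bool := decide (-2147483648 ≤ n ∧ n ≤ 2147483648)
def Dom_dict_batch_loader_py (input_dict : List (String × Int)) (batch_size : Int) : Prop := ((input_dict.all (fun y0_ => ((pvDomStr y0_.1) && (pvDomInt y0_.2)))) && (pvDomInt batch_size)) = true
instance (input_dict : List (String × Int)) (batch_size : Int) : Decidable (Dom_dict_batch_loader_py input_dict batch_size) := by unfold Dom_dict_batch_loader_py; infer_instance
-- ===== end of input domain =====

-- B yields successive batch_size-slices of the item list instead of A's per-item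
-- accumulator with a modulo counter; return values agree for batch_size > 0.

-- ===== PORT A =====
-- per-item step of A's loop: state = (cnt, batch, out)
def pvStepA (batch_size : Int)
    (s : Int × List (String × Int) × List (List (String × Int)))
    (kv : String × Int) : Int × List (String × Int) × List (List (String × Int)) :=
  let batch := s.2.1 ++ [kv]
  let cnt := s.1 + 1
  if PySem.Int.mod cnt batch_size = 0 then (cnt, [], s.2.2 ++ [batch])
  else (cnt, batch, s.2.2)

def dict_batch_loader_py (input_dict : List (String × Int)) (batch_size : Int) : List (List (String × Int)) :=
  let st := input_dict.foldl (pvStepA batch_size) (0, [], [])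
  if st.2.1 = [] then st.2.2 else st.2.2 ++ [st.2.1]

-- ===== PORT B =====
-- B's while loop over the remaining suffix; fuel only makes the recursion total
-- for batch_size ≤ 0 (excluded by Pre_), it never runs out when batch_size > 0
def pvAltLoop (batch_size : Int) : Nat → List (String × Int) → List (List (String × Int))
  | _, [] => []
  | 0, _ :: _ => []
  | fuel + 1, x :: t =>
      PySem.List.slice (x :: t) none (some batch_size) ::
        pvAltLoop batch_size fuel (PySem.List.slice (x :: t) (some batch_size) none)

def dict_batch_loader_py_alt (input_dict : List (String × Int)) (batch_size : Int) : List (List (String × Int)) :=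
  pvAltLoop batch_size (input_dict.length + 1) input_dict

-- ===== PRECONDITION & SPEC =====
-- A (and B) assert batch_size > 0 and raise AssertionError otherwise
def Pre_dict_batch_loader_py (input_dict : List (String × Int)) (batch_size : Int) : Prop :=
  0 < batch_size

instance (input_dict : List (String × Int)) (batch_size : Int) : Decidable (Pre_dict_batch_loader_py input_dict batch_size) := by
  unfold Pre_dict_batch_loader_py; infer_instance

def pvWitness_dict_batch_loader_py : (List (String × Int)) × Int := ([("a", 1), ("b", 2), ("c", 3)], 2)

def Spec_dict_batch_loader_py (input_dict : List (String × Int)) (batch_size : Int) (out : List (List (String × Int))) : Prop := out = dict_batch_loader_py_alt input_dict batch_size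
instance (input_dict : List (String × Int)) (batch_size : Int) (out : List (List (String × Int))) : Decidable (Spec_dict_batch_loader_py input_dict batch_size out) := by unfold Spec_dict_batch_loader_py; infer_instance

-- ===== CLAIM (what is proved, stated in full; the proofs are below) =====
def Claim_equal_dict_batch_loader_py : Prop := ∀ (input_dict : List (String × Int)) (batch_size : Int), Dom_dict_batch_loader_py input_dict batch_size → Pre_dict_batch_loader_py input_dict batch_size → Spec_dict_batch_loader_py input_dict batch_size (dict_batch_loader_py input_dict batch_size)

-- ===== LEMMAS AND PROOFS =====

-- proof-only reference chunker, fed one item at a time like A's loop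
def pvCF (b : Nat) (batch : List (String × Int)) : List (String × Int) → List (List (String × Int))
  | [] => if batch = [] then [] else [batch]
  | x :: t => if batch.length + 1 = b then (batch ++ [x]) :: pvCF b [] t
              else pvCF b (batch ++ [x]) t

theorem pvModSucc (bs cnt L : Int) (hbs : 0 < bs) (hL0 : 0 ≤ L) (hLb : L < bs)
    (h : cnt % bs = L) : (cnt + 1) % bs = if L + 1 = bs then 0 else L + 1 := by
  have hdiv : bs * (cnt / bs) + cnt % bs = cnt := Int.ediv_add_emod cnt bs
  clear hbs
  have hc : cnt + 1 = (L + 1) + bs * (cnt / bs) := by omega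
  rw [hc, Int.add_mul_emod_self_left]
  split_ifs with he
  · simp [he]
  · exact Int.emod_eq_of_lt (by omega) (by omega)

-- one-chunk unfolding of pvCF started on a partial batch
theorem pvCF_head (bs : Int) (hbs : 0 < bs) :
    ∀ (l batch : List (String × Int)), batch.length < bs.toNat →
      pvCF bs.toNat batch l =
        (if batch ++ l = [] then []
         else ((batch ++ l).take bs.toNat) :: pvCF bs.toNat [] ((batch ++ l).drop bs.toNat)) := by
  intro l
  induction l with
  | nil =>
      intro batch hb
      cases hbe : batch with
      | nil => simp [pvCF]
      | cons y ys =>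
          subst hbe
          have h1 : (y :: ys).take bs.toNat = y :: ys := List.take_of_length_le (by omega)
          have h2 : (y :: ys).drop bs.toNat = [] := List.drop_of_length_le (by omega)
          simp [pvCF, h1, h2]
  | cons x t ih =>
      intro batch hb
      have hne : ¬ (batch ++ x :: t = []) := by simp
      rw [pvCF, if_neg hne]
      by_cases he : batch.length + 1 = bs.toNat
      · rw [if_pos he]
        have htake : (batch ++ x :: t).take bs.toNat = batch ++ [x] := by
          rw [List.take_append]
          have h1 : batch.take bs.toNat = batch := List.take_of_length_le (by omega)
          have h2 : bs.toNat - batch.length = 1 := by omega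
          simp [h1, h2]
        have hdrop : (batch ++ x :: t).drop bs.toNat = t := by
          rw [List.drop_append]
          have h1 : batch.drop bs.toNat = [] := List.drop_of_length_le (by omega)
          have h2 : bs.toNat - batch.length = 1 := by omega
          simp [h1, h2]
        rw [htake, hdrop]
      · rw [if_neg he]
        have hb' : (batch ++ [x]).length < bs.toNat := by
          simp only [List.length_append, List.length_cons, List.length_nil]
          omega
        rw [ih (batch ++ [x]) hb']
        have : batch ++ [x] ++ t = batch ++ x :: t := by simp
        rw [this, if_neg hne]

theorem pvAltLoop_eq_pvCF (bs : Int) (hbs : 0 < bs) :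
    ∀ (fuel : Nat) (l : List (String × Int)), l.length < fuel →
      pvAltLoop bs fuel l = pvCF bs.toNat [] l := by
  intro fuel
  induction fuel with
  | zero => intro l hl; omega
  | succ f ih =>
      intro l hl
      cases l with
      | nil => simp [pvAltLoop, pvCF]
      | cons x t =>
          rw [pvAltLoop]
          have hs1 : PySem.List.slice (x :: t) none (some bs) = (x :: t).take bs.toNat :=
            PySem.List.slice_to _ (le_of_lt hbs)
          have hs2 : PySem.List.slice (x :: t) (some bs) none = (x :: t).drop bs.toNat :=
            PySem.List.slice_from _ (le_of_lt hbs)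
          have hlen : ((x :: t).drop bs.toNat).length < f := by
            simp only [List.length_drop, List.length_cons] at *
            omega
          rw [hs1, hs2, ih _ hlen,
            pvCF_head bs hbs (x :: t) [] (by simpa using hbs)]
          simp

-- invariant of A's fold: batch holds cnt % batch_size items
theorem pvFoldA_eq (bs : Int) (hbs : 0 < bs) :
    ∀ (l batch : List (String × Int)) (cnt : Int) (out : List (List (String × Int))),
      PySem.Int.mod cnt bs = (batch.length : Int) → batch.length < bs.toNat →
      (let st := l.foldl (pvStepA bs) (cnt, batch, out)
       if st.2.1 = [] then st.2.2 else st.2.2 ++ [st.2.1]) = out ++ pvCF bs.toNat batch l := by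
  intro l
  induction l with
  | nil =>
      intro batch cnt out hmod hblt
      cases batch with
      | nil => simp [pvCF]
      | cons y ys => simp [pvCF]
  | cons x t ih =>
      intro batch cnt out hmod hblt
      have hmod' : cnt % bs = (batch.length : Int) := by
        rwa [PySem.Int.mod_eq_emod_of_pos hbs] at hmod
      have hkey : (cnt + 1) % bs =
          if (batch.length : Int) + 1 = bs then 0 else (batch.length : Int) + 1 :=
        pvModSucc bs cnt (batch.length : Int) hbs (by positivity) (by omega) hmod'
      simp only [List.foldl_cons]
      rw [pvCF]
      by_cases he : batch.length + 1 = bs.toNat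
      · have heZ : (batch.length : Int) + 1 = bs := by omega
        have hm0 : PySem.Int.mod (cnt + 1) bs = 0 := by
          rw [PySem.Int.mod_eq_emod_of_pos hbs, hkey, if_pos heZ]
        have hstep : pvStepA bs (cnt, batch, out) x = (cnt + 1, [], out ++ [batch ++ [x]]) := by
          simp [pvStepA, hm0]
        rw [hstep, ih [] (cnt + 1) (out ++ [batch ++ [x]]) (by simp [hm0]) (by simp only [List.length_nil]; omega)]
        rw [if_pos he]
        simp
      · have heZ : ¬ ((batch.length : Int) + 1 = bs) := by omega
        have hm1 : PySem.Int.mod (cnt + 1) bs = (batch.length : Int) + 1 := by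
          rw [PySem.Int.mod_eq_emod_of_pos hbs, hkey, if_neg heZ]
        have hne : ¬ (PySem.Int.mod (cnt + 1) bs = 0) := by rw [hm1]; omega
        have hstep : pvStepA bs (cnt, batch, out) x = (cnt + 1, batch ++ [x], out) := by
          simp [pvStepA, hne]
        rw [hstep, ih (batch ++ [x]) (cnt + 1) out
              (by rw [hm1]; simp)
              (by simp only [List.length_append, List.length_cons, List.length_nil]; omega)]
        rw [if_neg he]

-- ===== VERDICT (by name: the statement is the Claim_ definition above) =====
theorem dict_batch_loader_py_spec : Claim_equal_dict_batch_loader_py := by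
  intro input_dict batch_size _hdom hpre
  unfold Spec_dict_batch_loader_py dict_batch_loader_py dict_batch_loader_py_alt
  have hbs : 0 < batch_size := hpre
  rw [pvAltLoop_eq_pvCF batch_size hbs (input_dict.length + 1) input_dict (by omega)]
  have hm : PySem.Int.mod 0 batch_size = ((List.length ([] : List (String × Int)) : Nat) : Int) := by
    rw [PySem.Int.mod_eq_emod_of_pos hbs]; simp
  have hlt : List.length ([] : List (String × Int)) < batch_size.toNat := by
    simp only [List.length_nil]; omega
  have := pvFoldA_eq batch_size hbs input_dict [] 0 [] hm hlt
  simpa using this
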